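-- pv_equiv track=rewrite | github.com/demoshane/secondbrain | engine/segmenter.py | _enforce_max_cap
-- ===== SOURCE A (Python) =====
-- _MAX_SEGMENTS = 20
--
-- def _enforce_max_cap(segments: list[str]) -> list[str]:
--     """Merge smallest pairs until segment count is <= _MAX_SEGMENTS."""
--     while len(segments) > _MAX_SEGMENTS:
--         # Find shortest segment by length
--         min_idx = min(range(len(segments)), key=lambda i: len(segments[i]))
--         # Merge with adjacent (prefer previous, else next)
--         if min_idx > 0:
--             merge_into = min_idx - 1
--             segments[merge_into] = segments[merge_into].rstrip() + "\n\n" + segments[min_idx]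
--             segments.pop(min_idx)
--         else:
--             segments[1] = segments[0].rstrip() + "\n\n" + segments[1]
--             segments.pop(0)
--
--     return segments
-- ===== SOURCE B (Python) =====
-- _MAX_SEGMENTS = 20
--
-- def _queue_insert(queue, key):
--     """Insert key into the sorted pending queue, before the first entry >= key."""
--     i = 0
--     while i < len(queue) and queue[i] < key:
--         i += 1
--     queue.insert(i, key)
--
-- def _enforce_max_cap(segments):
--     """Priority queue of (length, position) entries with lazy deletion, over a
--     doubly linked list of segments, instead of rescanning for the minimum and
--     rebuilding the list on every merge.  Does not mutate its argument."""
--     n = len(segments)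
--     if n <= _MAX_SEGMENTS:
--         return segments
--     text = list(segments)
--     alive = [True] * n
--     nxt = list(range(1, n + 1))       # n acts as the end-of-list sentinel
--     prv = list(range(-1, n - 1))      # -1 marks "no previous segment"
--     queue = []
--     for i, s in enumerate(segments):
--         _queue_insert(queue, (len(s), i))
--     count = n
--     while count > _MAX_SEGMENTS:
--         l, p = queue.pop(0)
--         if not alive[p] or len(text[p]) != l:
--             continue                  # stale entry: lazily discarded
--         if prv[p] >= 0:
--             left, right = prv[p], p
--         else:
--             left, right = p, nxt[p]
--         merged = text[left].rstrip() + "\n\n" + text[right]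
--         text[left] = merged
--         alive[right] = False
--         r = nxt[right]
--         nxt[left] = r
--         if r < n:
--             prv[r] = left
--         _queue_insert(queue, (len(merged), left))
--         count -= 1
--     out = []
--     i = 0
--     while i < n:
--         out.append(text[i])
--         i = nxt[i]
--     return out
-- ===== Notes on version B (the rewrite author's own statement) =====
-- stated objective: alternative
-- what changed: A rescans the whole list for the shortest segment on every round and mutates it in place (argmin via min over an index range, assign into a neighbor, pop); B builds a sorted priority queue of (length, position) entries once, consumes it with lazy deletion of stale entries, performs each merge in O(1) on a doubly linked list (prev/next arrays), and reads the result off with one pointer walk; A mutates its argument, B does not.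
import Mathlib
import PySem

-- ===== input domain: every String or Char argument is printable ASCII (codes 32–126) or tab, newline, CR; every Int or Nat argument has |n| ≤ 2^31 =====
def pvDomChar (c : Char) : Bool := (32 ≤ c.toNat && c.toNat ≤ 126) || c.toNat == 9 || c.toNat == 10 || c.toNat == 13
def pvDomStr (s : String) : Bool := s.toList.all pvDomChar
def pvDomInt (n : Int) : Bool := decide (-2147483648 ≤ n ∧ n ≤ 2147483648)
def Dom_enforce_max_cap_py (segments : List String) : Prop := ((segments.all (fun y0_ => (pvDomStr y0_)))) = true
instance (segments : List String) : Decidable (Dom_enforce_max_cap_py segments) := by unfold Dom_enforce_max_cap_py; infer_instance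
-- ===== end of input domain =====

-- B replaces A's per-round rescan for the shortest segment (min over an index range, then
-- in-place surgery on the list) by a different data structure: a sorted pending queue of
-- (length, position) entries consumed with lazy deletion of stale entries, over a doubly
-- linked list (prev/next arrays) of segments, read out by one pointer walk at the end
-- (objective: alternative). A mutates its argument in place, B does not: the equivalence
-- proved here is about the RETURN value only.

-- ===== PORT A =====
def enforce_max_cap_py (segments : List String) : List String :=
  if 20 < segments.length then
    match PySem.List.min? (PySem.List.pyRange 0 (segments.length : Int) 1)
        (fun i => PySem.Str.len (PySem.List.pyGetD segments i "")) with
    | none => segments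
    | some min_idx =>
      if 0 < min_idx then
        match hp : PySem.List.pop? (PySem.List.pySetD segments (min_idx - 1)
            (PySem.Str.rstrip (PySem.List.pyGetD segments (min_idx - 1) "") ++ "\n\n"
              ++ PySem.List.pyGetD segments min_idx "")) min_idx with
        | none => segments
        | some (_, rest) => enforce_max_cap_py rest
      else
        match hp : PySem.List.pop? (PySem.List.pySetD segments 1
            (PySem.Str.rstrip (PySem.List.pyGetD segments 0 "") ++ "\n\n"
              ++ PySem.List.pyGetD segments 1 "")) 0 with
        | none => segments
        | some (_, rest) => enforce_max_cap_py rest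
  else segments
termination_by segments.length
decreasing_by
  · have h1 := PySem.List.length_of_pop?_eq_some _ hp
    rw [PySem.List.length_pySetD] at h1
    simp at h1
    omega
  · have h1 := PySem.List.length_of_pop?_eq_some _ hp
    rw [PySem.List.length_pySetD] at h1
    simp at h1
    omega

-- ===== PORT B =====
-- helper _queue_insert: insert key into the sorted queue before the first entry >= key
def pvLt (a b : Int × Int) : Bool := a.1 < b.1 || (a.1 == b.1 && a.2 < b.2)

def pvInsertKey (key : Int × Int) : List (Int × Int) → List (Int × Int)
  | [] => [key]
  | e :: es => if pvLt e key then e :: pvInsertKey key es else key :: e :: es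

-- the while-loop of B: pop the head entry, discard it if stale, else merge over the linked list
def pvCapLoop (n : Int) (queue : List (Int × Int)) (text : List String)
    (alive : List Bool) (nxt prv : List Int) (count : Int) :
    List String × List Int :=
  if 20 < count then
    match queue with
    | [] => (text, nxt)      -- queue.pop(0) raises IndexError here; unreachable from the entry point
    | (l, p) :: rest =>
      if (PySem.List.pyGetD alive p false) = false ∨ PySem.Str.len (PySem.List.pyGetD text p "") ≠ l then
        pvCapLoop n rest text alive nxt prv count
      else
        let lr : Int × Int :=
          if 0 ≤ PySem.List.pyGetD prv p (-1) then (PySem.List.pyGetD prv p (-1), p)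
          else (p, PySem.List.pyGetD nxt p n)
        let merged := PySem.Str.rstrip (PySem.List.pyGetD text lr.1 "") ++ "\n\n"
          ++ PySem.List.pyGetD text lr.2 ""
        let r := PySem.List.pyGetD nxt lr.2 n
        pvCapLoop n (pvInsertKey (PySem.Str.len merged, lr.1) rest)
          (PySem.List.pySetD text lr.1 merged)
          (PySem.List.pySetD alive lr.2 false)
          (PySem.List.pySetD nxt lr.1 r)
          (if r < n then PySem.List.pySetD prv r lr.1 else prv)
          (count - 1)
  else (text, nxt)
termination_by ((count - 20).toNat, queue.length)
decreasing_by
  · exact Prod.Lex.right _ (by simp)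
  · have : (count - 1 - 20).toNat < (count - 20).toNat := by omega
    exact Prod.Lex.left _ _ this

-- the final while-loop of B: walk the linked list from the head and collect the texts
def pvTraverse (n : Int) (text : List String) (nxt : List Int) (i : Int) : List String :=
  if _h : i < n then
    let j := PySem.List.pyGetD nxt i n
    if _h2 : i < j then PySem.List.pyGetD text i "" :: pvTraverse n text nxt j
    else [PySem.List.pyGetD text i ""]   -- totality guard; nxt strictly increases along the live chain
  else []
termination_by (n - i).toNat
decreasing_by omega

def enforce_max_cap_py_alt (segments : List String) : List String :=
  let n : Int := segments.length
  if n ≤ 20 then segments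
  else
    let queue := (PySem.List.enumerate segments).foldl
      (fun q e => pvInsertKey (PySem.Str.len e.2, e.1) q) []
    let st := pvCapLoop n queue segments (List.replicate segments.length true)
      (PySem.List.pyRange 1 (n + 1) 1) (PySem.List.pyRange (-1) (n - 1) 1) n
    pvTraverse n st.1 st.2 0

-- ===== PRECONDITION & SPEC =====
def Spec_enforce_max_cap_py (segments : List String) (out : List String) : Prop := out = enforce_max_cap_py_alt segments
instance (segments : List String) (out : List String) : Decidable (Spec_enforce_max_cap_py segments out) := by unfold Spec_enforce_max_cap_py; infer_instance

-- ===== CLAIM (what is proved, stated in full; the proofs are below) =====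
def Claim_equal_enforce_max_cap_py : Prop := ∀ (segments : List String), Dom_enforce_max_cap_py segments → Spec_enforce_max_cap_py segments (enforce_max_cap_py segments)

-- ===== LEMMAS AND PROOFS =====

-- small getD glue
theorem pv_set_getD_ne {α : Type} (l : List α) (m q : Nat) (v d : α) (hne : m ≠ q) :
    (l.set m v).getD q d = l.getD q d := by
  rw [List.getD_eq_getElem?_getD, List.getD_eq_getElem?_getD, List.getElem?_set_ne hne]

theorem pv_set_getD_self {α : Type} (l : List α) (m : Nat) (v d : α) (h : m < l.length) :
    (l.set m v).getD m d = v := by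
  rw [List.getD_eq_getElem _ _ (by simpa using h), List.getElem_set, if_pos rfl]

theorem pv_mem_getD (l : List Nat) (q : Nat) : q ∈ l ↔ ∃ i, i < l.length ∧ l.getD i 0 = q := by
  rw [List.mem_iff_getElem]
  constructor
  · rintro ⟨i, h, rfl⟩; exact ⟨i, h, List.getD_eq_getElem _ _ h⟩
  · rintro ⟨i, h, hq⟩; exact ⟨i, h, by rw [← List.getD_eq_getElem _ 0 h, hq]⟩

theorem pv_eraseIdx_getD (l : List Nat) (k i : Nat) (h : i + 1 < l.length) :
    (l.eraseIdx k).getD i 0 = if i < k then l.getD i 0 else l.getD (i+1) 0 := by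
  have hlen : (l.eraseIdx k).length = if k < l.length then l.length - 1 else l.length := List.length_eraseIdx
  by_cases hc : i < k
  · rw [if_pos hc, List.getD_eq_getElem _ _ (by split at hlen <;> omega),
      List.getElem_eraseIdx_of_lt _ hc, List.getD_eq_getElem _ _ (by omega)]
  · rw [if_neg hc, List.getD_eq_getElem _ _ (by split at hlen <;> omega),
      List.getElem_eraseIdx_of_ge _ (by omega), List.getD_eq_getElem _ _ (by omega)]

theorem pv_map_getD {α β : Type} (l : List α) (f : α → β) (i : Nat) (d : α) (db : β)
    (h : i < l.length) : (l.map f).getD i db = f (l.getD i d) := by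
  rw [List.getD_eq_getElem _ _ (by simpa using h), List.getElem_map, List.getD_eq_getElem _ _ h]

-- order facts for the queue entries (Python tuple comparison, lexicographic)
def pvLe (a b : Int × Int) : Prop := a.1 < b.1 ∨ (a.1 = b.1 ∧ a.2 ≤ b.2)

theorem pvLe_of_not_lt {a b : Int × Int} (h : ¬ (pvLt b a = true)) : pvLe a b := by
  simp [pvLt] at h
  unfold pvLe
  rcases h with ⟨h1, h2⟩
  omega

theorem pvLe_of_lt {a b : Int × Int} (h : pvLt a b = true) : pvLe a b := by
  simp [pvLt] at h
  unfold pvLe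
  omega

theorem pvLe_trans {a b c : Int × Int} (h1 : pvLe a b) (h2 : pvLe b c) : pvLe a c := by
  unfold pvLe at *
  omega

theorem pvInsertKey_perm (x : Int × Int) (ys : List (Int × Int)) :
    (pvInsertKey x ys).Perm (x :: ys) := by
  induction ys with
  | nil => simp [pvInsertKey]
  | cons e es ih =>
    rw [pvInsertKey]
    split
    · exact ((ih.cons e).trans (List.Perm.swap x e es)).symm.symm
    · exact List.Perm.refl _

theorem pvInsertKey_mem {x y : Int × Int} {ys : List (Int × Int)} :
    y ∈ pvInsertKey x ys ↔ y = x ∨ y ∈ ys := by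
  rw [(pvInsertKey_perm x ys).mem_iff, List.mem_cons]

theorem pvInsertKey_pairwise (x : Int × Int) (ys : List (Int × Int))
    (h : List.Pairwise pvLe ys) : List.Pairwise pvLe (pvInsertKey x ys) := by
  induction ys with
  | nil => simp [pvInsertKey]
  | cons e es ih =>
    rw [pvInsertKey]
    rw [List.pairwise_cons] at h
    split
    · rename_i hlt
      rw [List.pairwise_cons]
      refine ⟨?_, ih h.2⟩
      intro y hy
      rcases pvInsertKey_mem.1 hy with rfl | hy'
      · exact pvLe_of_lt hlt
      · exact h.1 y hy'
    · rename_i hnlt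
      rw [List.pairwise_cons]
      refine ⟨?_, List.pairwise_cons.2 h⟩
      intro y hy
      rcases List.mem_cons.1 hy with rfl | hy'
      · exact pvLe_of_not_lt hnlt
      · exact pvLe_trans (pvLe_of_not_lt hnlt) (h.1 y hy')

theorem pv_foldl_insert_perm (ks : List (Int × Int)) :
    ∀ acc, (ks.foldl (fun q k => pvInsertKey k q) acc).Perm (acc ++ ks) := by
  induction ks with
  | nil => intro acc; simp
  | cons k ks ih =>
    intro acc
    simp only [List.foldl_cons]
    exact (ih _).trans (((pvInsertKey_perm k acc).append_right ks).trans List.perm_middle.symm)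

theorem pv_foldl_insert_pairwise (ks : List (Int × Int)) :
    ∀ acc, List.Pairwise pvLe acc →
      List.Pairwise pvLe (ks.foldl (fun q k => pvInsertKey k q) acc) := by
  induction ks with
  | nil => intro acc h; simpa
  | cons k ks ih =>
    intro acc h
    exact ih _ (pvInsertKey_pairwise k acc h)

-- ===== A-side characterisation =====

-- A's min(range, key) keeps the FIRST element attaining the minimal key
theorem pv_min?_first {α κ : Type} [LinearOrder κ] (xs : List α) (key : α → κ) (m : α)
    (h : PySem.List.min? xs key = some m) :
    ∃ pre suf, xs = pre ++ m :: suf ∧ ∀ y ∈ pre, key m < key y := by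
  induction xs using List.reverseRecOn with
  | nil => simp [PySem.List.min?] at h
  | append_singleton xs x ih =>
    have hsplit : PySem.List.min? (xs ++ [x]) key =
        match PySem.List.min? xs key with
        | none => some x
        | some p => if key x < key p then some x else some p := by
      simp [PySem.List.min?, List.foldl_append]
      rfl
    rw [hsplit] at h
    cases hprev : PySem.List.min? xs key with
    | none =>
      have hnil : xs = [] := (PySem.List.min?_eq_none_iff xs key).1 hprev
      rw [hprev] at h
      simp at h
      exact ⟨[], [], by simp [hnil, h], by simp⟩
    | some p =>
      rw [hprev] at h
      simp at h
      by_cases hlt : key x < key p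
      · rw [if_pos hlt] at h
        cases h
        refine ⟨xs, [], rfl, ?_⟩
        intro y hy
        exact lt_of_lt_of_le hlt (PySem.List.min?_isMin hprev y hy)
      · rw [if_neg hlt] at h
        cases h
        obtain ⟨pre, suf, hdec, hpre⟩ := ih hprev
        exact ⟨pre, suf ++ [x], by simp [hdec], hpre⟩

-- the first index attaining the minimal segment length
def pvIsFirstArgmin (lens : List Int) (j : Nat) : Prop :=
  j < lens.length ∧ (∀ i, i < lens.length → lens.getD j 0 ≤ lens.getD i 0) ∧
    (∀ i, i < j → lens.getD j 0 < lens.getD i 0)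

-- A's argmin over the index range is THE first argmin
theorem pv_A_argmin (xs : List String) {mi : Int}
    (hA : PySem.List.min? (PySem.List.pyRange 0 (xs.length : Int) 1)
      (fun i => PySem.Str.len (PySem.List.pyGetD xs i "")) = some mi)
    {j : Nat} (hfa : pvIsFirstArgmin (xs.map (fun s => PySem.Str.len s)) j) :
    mi = (j : Int) := by
  set lens := xs.map (fun s => PySem.Str.len s) with hlens
  have hlenslen : lens.length = xs.length := by simp [hlens]
  have hbridge : ∀ (i : Nat), i < xs.length →
      PySem.Str.len (PySem.List.pyGetD xs (i : Int) "") = lens.getD i 0 := by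
    intro i hi
    rw [PySem.List.pyGetD_natCast, List.getD_eq_getElem xs _ hi,
      List.getD_eq_getElem lens _ (by omega)]
    simp [hlens]
  have h0mi : 0 ≤ mi ∧ mi < (xs.length : Int) := by
    have := PySem.List.min?_mem hA
    rwa [PySem.List.mem_pyRange_one] at this
  have hAmin : ∀ (i : Nat), i < xs.length → lens.getD mi.toNat 0 ≤ lens.getD i 0 := by
    intro i hi
    have hmemi : (i : Int) ∈ PySem.List.pyRange 0 (xs.length : Int) 1 := by
      rw [PySem.List.mem_pyRange_one]; omega
    have := PySem.List.min?_isMin hA _ hmemi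
    rwa [hbridge i hi, show mi = ((mi.toNat : Nat) : Int) by omega,
      hbridge mi.toNat (by omega)] at this
  have hAfirst : ∀ (i : Nat), i < mi.toNat → lens.getD mi.toNat 0 < lens.getD i 0 := by
    intro i hi
    obtain ⟨pre, suf, hdec, hpre⟩ := pv_min?_first _ _ _ hA
    have hpw := PySem.List.pairwise_lt_pyRange_one 0 (xs.length : Int)
    rw [hdec, List.pairwise_append] at hpw
    obtain ⟨-, hp2, hcross⟩ := hpw
    rw [List.pairwise_cons] at hp2
    have hmemi : (i : Int) ∈ PySem.List.pyRange 0 (xs.length : Int) 1 := by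
      rw [PySem.List.mem_pyRange_one]; omega
    rw [hdec] at hmemi
    have hipre : (i : Int) ∈ pre := by
      rcases List.mem_append.1 hmemi with h' | h'
      · exact h'
      · rcases List.mem_cons.1 h' with h'' | h''
        · omega
        · have := hp2.1 _ h''; omega
    have := hpre _ hipre
    rwa [hbridge i (by omega), show mi = ((mi.toNat : Nat) : Int) by omega,
      hbridge mi.toNat (by omega)] at this
  obtain ⟨hjlt, hjmin, hjfirst⟩ := hfa
  rcases lt_trichotomy mi.toNat j with hlt | heq | hgt
  · have h1 := hjfirst mi.toNat hlt
    have h2 := hAmin j (by omega)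
    omega
  · omega
  · have h1 := hAfirst j hgt
    have h2 := hjmin mi.toNat (by omega)
    omega

-- A's set-then-pop surgery equals the take/merge/drop rebuild
theorem pv_rebuild (xs : List String) (v : String) (j : Nat) (h1 : 1 ≤ j) (hj : j < xs.length) :
    (xs.set (j - 1) v).eraseIdx j = xs.take (j - 1) ++ v :: xs.drop (j + 1) := by
  rw [List.set_eq_take_cons_drop v (show j - 1 < xs.length by omega),
    List.eraseIdx_eq_take_drop_succ]
  rw [List.take_append, List.drop_append]
  have hlt : (xs.take (j - 1)).length = j - 1 := by
    rw [List.length_take]; omega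
  rw [hlt]
  rw [List.take_take, show min j (j-1) = j - 1 by omega]
  rw [show j - (j - 1) = 1 by omega]
  rw [List.drop_eq_nil_of_le (by omega : (xs.take (j-1)).length ≤ j + 1)]
  rw [show j + 1 - (j - 1) = 2 by omega]
  simp [List.drop_drop]
  omega

-- one iteration of A's while-loop, at the first argmin j, merging at position k = max j 1
theorem pv_stepA (xs : List String) (h : 20 < xs.length) (j : Nat)
    (hfa : pvIsFirstArgmin (xs.map (fun s => PySem.Str.len s)) j) :
    enforce_max_cap_py xs = enforce_max_cap_py
      (xs.take (max j 1 - 1)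
        ++ (PySem.Str.rstrip (xs.getD (max j 1 - 1) "") ++ "\n\n" ++ xs.getD (max j 1) "")
        :: xs.drop (max j 1 + 1)) := by
  have hjlt : j < xs.length := by
    have := hfa.1; simpa using this
  have hklt : max j 1 < xs.length := by omega
  obtain ⟨mi, hA⟩ : ∃ mi, PySem.List.min? (PySem.List.pyRange 0 (xs.length : Int) 1)
      (fun i => PySem.Str.len (PySem.List.pyGetD xs i "")) = some mi := by
    cases hAA : PySem.List.min? (PySem.List.pyRange 0 (xs.length : Int) 1)
        (fun i => PySem.Str.len (PySem.List.pyGetD xs i "")) with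
    | none =>
      have := (PySem.List.min?_eq_none_iff _ _).1 hAA
      have hlen := congrArg List.length this
      rw [PySem.List.length_pyRange_one] at hlen
      simp only [List.length_nil] at hlen
      omega
    | some mi => exact ⟨mi, rfl⟩
  have hmij : mi = (j : Int) := pv_A_argmin xs hA hfa
  conv_lhs => rw [enforce_max_cap_py]
  rw [if_pos h]
  split
  · rename_i heq
    rw [hA] at heq; cases heq
  · rename_i min_idx heq
    rw [hA] at heq
    have hmidx : min_idx = (j : Int) := by
      rw [hmij] at heq; exact (Option.some.inj heq).symm
    subst hmidx
    by_cases hj0 : j = 0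
    · subst hj0
      rw [if_neg (by norm_num)]
      have hset : PySem.List.pySetD xs 1
          (PySem.Str.rstrip (PySem.List.pyGetD xs 0 "") ++ "\n\n"
            ++ PySem.List.pyGetD xs 1 "") = xs.set 1
          (PySem.Str.rstrip (PySem.List.pyGetD xs 0 "") ++ "\n\n"
            ++ PySem.List.pyGetD xs 1 "") := by
        rw [PySem.List.pySetD_of_nonneg _ _ (by norm_num)]
        norm_num
      rw [hset]
      have hpop := PySem.List.pop?_natCast (xs.set 1
          (PySem.Str.rstrip (PySem.List.pyGetD xs 0 "") ++ "\n\n"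
            ++ PySem.List.pyGetD xs 1 "")) 0 (by simp; omega)
      split
      · rename_i hp
        rw [show ((0:Nat):Int) = (0:Int) from rfl] at hpop
        rw [hpop] at hp; cases hp
      · rename_i fst rest hp
        rw [show ((0:Nat):Int) = (0:Int) from rfl] at hpop
        rw [hpop] at hp
        have hrest := congrArg Prod.snd (Option.some.inj hp)
        simp only at hrest
        rw [← hrest]
        congr 1
        have hg0 : PySem.List.pyGetD xs 0 "" = xs.getD 0 "" := by
          rw [show (0:Int) = ((0:Nat):Int) from rfl, PySem.List.pyGetD_natCast]
        have hg1 : PySem.List.pyGetD xs 1 "" = xs.getD 1 "" := by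
          rw [show (1:Int) = ((1:Nat):Int) by norm_num, PySem.List.pyGetD_natCast]
        rw [hg0, hg1]
        match xs, hklt with
        | a :: b :: t, _ => simp
    · have hj1 : 1 ≤ j := by omega
      rw [if_pos (by exact_mod_cast Nat.pos_of_ne_zero hj0)]
      rw [show ((j:Nat):Int) - 1 = ((j - 1 : Nat) : Int) by omega]
      rw [PySem.List.pySetD_natCast]
      have hpop := PySem.List.pop?_natCast (xs.set (j-1)
          (PySem.Str.rstrip (PySem.List.pyGetD xs (((j:Nat) - 1 : Nat) : Int) "") ++ "\n\n"
            ++ PySem.List.pyGetD xs ((j:Nat):Int) "")) j (by simp; omega)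
      split
      · rename_i hp
        rw [hpop] at hp; cases hp
      · rename_i fst rest hp
        rw [hpop] at hp
        have hrest := congrArg Prod.snd (Option.some.inj hp)
        simp only at hrest
        rw [← hrest]
        congr 1
        rw [pv_rebuild _ _ j hj1 hjlt, show max j 1 = j by omega]
        rw [PySem.List.pyGetD_natCast, PySem.List.pyGetD_natCast]

-- ===== B-side simulation invariant =====
-- ps is the list of still-alive original positions, in order; it ties B's state to A's list
structure PvInv (n : Nat) (ps : List Nat) (queue : List (Int × Int)) (text : List String)
    (alive : List Bool) (nxt prv : List Int) : Prop where
  text_len : text.length = n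
  alive_len : alive.length = n
  nxt_len : nxt.length = n
  prv_len : prv.length = n
  ps_ne : ps ≠ []
  ps_head : ps.getD 0 0 = 0
  ps_bound : ∀ p ∈ ps, p < n
  ps_sorted : ∀ i j, i < j → j < ps.length → ps.getD i 0 < ps.getD j 0
  alive_iff : ∀ q, q < n → (alive.getD q false = true ↔ q ∈ ps)
  nxt_chain : ∀ i, i + 1 < ps.length → nxt.getD (ps.getD i 0) 0 = ((ps.getD (i+1) 0 : Nat) : Int)
  nxt_last : nxt.getD (ps.getD (ps.length - 1) 0) 0 = (n : Int)
  prv_chain : ∀ i, i + 1 < ps.length → prv.getD (ps.getD (i+1) 0) 0 = ((ps.getD i 0 : Nat) : Int)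
  prv_head : prv.getD 0 0 = -1
  q_sorted : List.Pairwise pvLe queue
  q_mem : ∀ p ∈ ps, (PySem.Str.len (text.getD p ""), (p : Int)) ∈ queue
  q_pos : ∀ e ∈ queue, 0 ≤ e.2 ∧ e.2 < (n : Int)

-- a valid popped head entry names the first argmin of the current segment lengths
theorem pv_argminB (n : Nat) (ps : List Nat) (queue : List (Int × Int)) (text : List String)
    (alive : List Bool) (nxt prv : List Int)
    (inv : PvInv n ps queue text alive nxt prv)
    (l : Int) (pN : Nat) (rest : List (Int × Int))
    (hq : queue = (l, (pN : Int)) :: rest)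
    (hmem : pN ∈ ps) (hlen : PySem.Str.len (text.getD pN "") = l) :
    ∃ jj, jj < ps.length ∧ ps.getD jj 0 = pN ∧
      pvIsFirstArgmin ((ps.map (fun q => text.getD q "")).map (fun s => PySem.Str.len s)) jj := by
  obtain ⟨jj, hjj, hpsj⟩ := (pv_mem_getD ps pN).1 hmem
  set lens := (ps.map (fun q => text.getD q "")).map (fun s => PySem.Str.len s) with hld
  have hlenlen : lens.length = ps.length := by simp [hld]
  have hlens : ∀ i, i < ps.length → lens.getD i 0 = PySem.Str.len (text.getD (ps.getD i 0) "") := by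
    intro i hi
    rw [hld, pv_map_getD _ _ i "" 0 (by simpa using hi), pv_map_getD ps _ i 0 "" hi]
  have hhead : ∀ e ∈ rest, pvLe (l, (pN : Int)) e := by
    have := inv.q_sorted
    rw [hq, List.pairwise_cons] at this
    exact this.1
  have hkey : ∀ i, i < ps.length →
      (PySem.Str.len (text.getD (ps.getD i 0) ""), ((ps.getD i 0 : Nat) : Int)) ∈ queue := by
    intro i hi
    exact inv.q_mem _ ((pv_mem_getD ps (ps.getD i 0)).2 ⟨i, hi, rfl⟩)
  refine ⟨jj, hjj, hpsj, by omega, ?_, ?_⟩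
  · intro i hi
    rw [hlenlen] at hi
    rw [hlens i hi, hlens jj hjj, hpsj, hlen]
    have hk := hkey i hi
    rw [hq, List.mem_cons] at hk
    rcases hk with hk | hk
    · have h1 := congrArg Prod.fst hk
      simp only at h1
      omega
    · have := hhead _ hk
      unfold pvLe at this
      simp only at this
      omega
  · intro i hi
    rw [hlens i (by omega), hlens jj hjj, hpsj, hlen]
    have hqi : ps.getD i 0 < pN := by
      have := inv.ps_sorted i jj hi hjj
      omega
    have hk := hkey i (by omega)
    rw [hq, List.mem_cons] at hk
    rcases hk with hk | hk
    · have h2 := congrArg Prod.snd hk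
      simp only at h2
      omega
    · have := hhead _ hk
      unfold pvLe at this
      simp only at this
      omega

-- the merge step preserves the invariant
theorem pv_inv_step (n : Nat) (ps : List Nat) (queue : List (Int × Int)) (text : List String)
    (alive : List Bool) (nxt prv : List Int)
    (inv : PvInv n ps queue text alive nxt prv) (hc : 20 < ps.length)
    (j : Nat) (hj : j < ps.length) (rest : List (Int × Int))
    (hq : queue = (PySem.Str.len (text.getD (ps.getD j 0) ""), ((ps.getD j 0 : Nat) : Int)) :: rest)
    (k : Nat) (hk : k = max j 1)
    (leftN rightN : Nat) (hl : leftN = ps.getD (k-1) 0) (hr : rightN = ps.getD k 0)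
    (merged : String)
    (hm : merged = PySem.Str.rstrip (text.getD leftN "") ++ "\n\n" ++ text.getD rightN "")
    (rr : Int) (hrr : rr = nxt.getD rightN 0) :
    PvInv n (ps.eraseIdx k) (pvInsertKey (PySem.Str.len merged, (leftN : Int)) rest)
      (text.set leftN merged) (alive.set rightN false) (nxt.set leftN rr)
      (if rr < (n : Int) then prv.set rr.toNat (leftN : Int) else prv) := by
  have hk1 : 1 ≤ k := by omega
  have hkl : k < ps.length := by
    rcases Nat.eq_zero_or_pos j with h0 | h1
    · subst h0; omega
    · omega
  have hlen' : (ps.eraseIdx k).length = ps.length - 1 := by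
    rw [List.length_eraseIdx, if_pos hkl]
  have hged : ∀ i, i + 1 < ps.length →
      (ps.eraseIdx k).getD i 0 = if i < k then ps.getD i 0 else ps.getD (i+1) 0 :=
    fun i hi => pv_eraseIdx_getD ps k i hi
  have hdist : ∀ i i', i < ps.length → i' < ps.length → i ≠ i' → ps.getD i 0 ≠ ps.getD i' 0 := by
    intro i i' hi hi' hne
    rcases Nat.lt_or_ge i i' with hlt | hge
    · exact Nat.ne_of_lt (inv.ps_sorted i i' hlt hi')
    · exact (Nat.ne_of_lt (inv.ps_sorted i' i (by omega) hi)).symm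
  have hbnd : ∀ i, i < ps.length → ps.getD i 0 < n := by
    intro i hi
    exact inv.ps_bound _ ((pv_mem_getD ps _).2 ⟨i, hi, rfl⟩)
  have hbl : leftN < n := hl ▸ hbnd (k-1) (by omega)
  have hbr : rightN < n := hr ▸ hbnd k hkl
  have hlr : leftN < rightN := by
    rw [hl, hr]; exact inv.ps_sorted (k-1) k (by omega) hkl
  have hrchar : (k + 1 < ps.length ∧ rr = ((ps.getD (k+1) 0 : Nat) : Int))
      ∨ (k + 1 = ps.length ∧ rr = (n : Int)) := by
    rcases Nat.lt_or_ge (k+1) ps.length with hlt | hge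
    · left
      refine ⟨hlt, ?_⟩
      rw [hrr, hr]
      exact inv.nxt_chain k hlt
    · right
      have hke : k = ps.length - 1 := by omega
      refine ⟨by omega, ?_⟩
      rw [hrr, hr, hke]
      exact inv.nxt_last
  have hrnot : rightN ∉ ps.eraseIdx k := by
    intro hmem
    obtain ⟨i, hi, hgi⟩ := (pv_mem_getD _ _).1 hmem
    rw [hlen'] at hi
    rw [hged i (by omega)] at hgi
    split at hgi
    · exact hdist i k (by omega) hkl (by omega) (hgi.trans hr)
    · exact hdist (i+1) k (by omega) hkl (by omega) (hgi.trans hr)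
  have hmem' : ∀ q, q ∈ ps.eraseIdx k → q ∈ ps := fun q hq' => List.mem_of_mem_eraseIdx hq'
  have hmem'' : ∀ q, q ∈ ps → q ≠ rightN → q ∈ ps.eraseIdx k := by
    intro q hqm hqne
    obtain ⟨i, hi, hgi⟩ := (pv_mem_getD _ _).1 hqm
    have hik : i ≠ k := by
      intro hik; exact hqne (by rw [← hgi, hik, ← hr])
    rcases Nat.lt_or_ge i k with hlt | hge
    · exact (pv_mem_getD _ _).2 ⟨i, by omega, by rw [hged i (by omega), if_pos hlt]; exact hgi⟩
    · exact (pv_mem_getD _ _).2 ⟨i - 1, by omega,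
        by rw [hged (i-1) (by omega), if_neg (by omega), show i - 1 + 1 = i by omega]; exact hgi⟩
  have hpjk : ps.getD j 0 = (if j = 0 then leftN else rightN) := by
    split
    · rename_i h0; rw [h0, hl, show k - 1 = 0 from by omega]
    · rename_i h0; rw [hr, show k = j from by omega]
  refine ⟨?_, ?_, ?_, ?_, ?_, ?_, ?_, ?_, ?_, ?_, ?_, ?_, ?_, ?_, ?_, ?_⟩
  · rw [List.length_set]; exact inv.text_len
  · rw [List.length_set]; exact inv.alive_len
  · rw [List.length_set]; exact inv.nxt_len
  · split
    · rw [List.length_set]; exact inv.prv_len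
    · exact inv.prv_len
  · intro hnil
    have := congrArg List.length hnil
    rw [hlen'] at this
    simp at this
    omega
  · rw [hged 0 (by omega), if_pos (by omega)]
    exact inv.ps_head
  · intro p hp
    exact inv.ps_bound p (hmem' p hp)
  · intro i i' hii hi'
    rw [hlen'] at hi'
    rw [hged i (by omega), hged i' (by omega)]
    split <;> split <;> exact inv.ps_sorted _ _ (by omega) (by omega)
  · intro q hq
    by_cases hqr : q = rightN
    · subst hqr
      rw [pv_set_getD_self _ _ _ _ (by rw [inv.alive_len]; omega)]
      simp only [Bool.false_eq_true, false_iff]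
      exact hrnot
    · rw [pv_set_getD_ne _ _ _ _ _ (fun h => hqr h.symm)]
      rw [inv.alive_iff q hq]
      exact ⟨fun h => hmem'' q h hqr, fun h => hmem' q h⟩
  · intro i hi
    rw [hlen'] at hi
    rw [hged i (by omega), hged (i+1) (by omega)]
    rcases Nat.lt_or_ge (i+1) k with hc1 | hc1
    · rw [if_pos (by omega : i < k), if_pos hc1]
      rw [pv_set_getD_ne _ _ _ _ _ (by rw [hl]; exact hdist (k-1) i (by omega) (by omega) (by omega))]
      exact inv.nxt_chain i (by omega)
    · rcases Nat.eq_or_lt_of_le hc1 with hc2 | hc2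
      · rw [if_pos (by omega : i < k), if_neg (by omega : ¬ i + 1 < k)]
        have hil : ps.getD i 0 = leftN := by rw [hl, show k - 1 = i from by omega]
        rw [hil, pv_set_getD_self _ _ _ _ (by rw [inv.nxt_len]; omega)]
        rcases hrchar with ⟨h1, h2⟩ | ⟨h1, h2⟩
        · rw [h2, show k + 1 = i + 1 + 1 from by omega]
        · omega
      · rw [if_neg (by omega : ¬ i < k), if_neg (by omega : ¬ i + 1 < k)]
        rw [pv_set_getD_ne _ _ _ _ _ (by rw [hl]; exact hdist (k-1) (i+1) (by omega) (by omega) (by omega))]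
        exact inv.nxt_chain (i+1) (by omega)
  · rw [hlen', hged (ps.length - 1 - 1) (by omega)]
    rcases Nat.lt_or_ge (ps.length - 1 - 1) k with hc | hc
    · rw [if_pos hc]
      have hke : k = ps.length - 1 := by omega
      have hil : ps.getD (ps.length - 1 - 1) 0 = leftN := by
        rw [hl, show k - 1 = ps.length - 1 - 1 from by omega]
      rw [hil, pv_set_getD_self _ _ _ _ (by rw [inv.nxt_len]; omega)]
      rcases hrchar with ⟨h1, h2⟩ | ⟨h1, h2⟩
      · omega
      · exact h2
    · rw [if_neg (by omega : ¬ ps.length - 1 - 1 < k)]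
      rw [pv_set_getD_ne _ _ _ _ _
        (by rw [hl]; exact hdist (k-1) (ps.length - 1 - 1 + 1) (by omega) (by omega) (by omega))]
      have := inv.nxt_last
      rw [show ps.length - 1 - 1 + 1 = ps.length - 1 by omega]
      exact this
  · intro i hi
    rw [hlen'] at hi
    rw [hged i (by omega), hged (i+1) (by omega)]
    have hset : ∀ q : Nat, (k + 1 < ps.length → q ≠ ps.getD (k+1) 0) →
        (if rr < (n : Int) then prv.set rr.toNat (leftN : Int) else prv).getD q 0 = prv.getD q 0 := by
      intro q hcase
      split
      · rename_i hrn
        rcases hrchar with ⟨h1, h2⟩ | ⟨h1, h2⟩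
        · rw [h2, Int.toNat_natCast]
          exact pv_set_getD_ne _ _ _ _ _ (fun hh => (hcase h1) hh.symm)
        · rw [h2] at hrn; omega
      · rfl
    rcases Nat.lt_or_ge (i+1) k with hc1 | hc1
    · rw [if_pos (by omega : i < k), if_pos hc1]
      rw [hset _ (fun h1 => hdist (i+1) (k+1) (by omega) (by omega) (by omega))]
      exact inv.prv_chain i (by omega)
    · rcases Nat.eq_or_lt_of_le hc1 with hc2 | hc2
      · rw [if_pos (by omega : i < k), if_neg (by omega : ¬ i + 1 < k)]
        rcases hrchar with ⟨h1, h2⟩ | ⟨h1, h2⟩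
        · rw [if_pos (show rr < (n:Int) by rw [h2]; exact_mod_cast hbnd (k+1) (by omega))]
          rw [h2, Int.toNat_natCast, show i + 1 + 1 = k + 1 from by omega,
            pv_set_getD_self _ _ _ _ (by rw [inv.prv_len]; exact hbnd (k+1) (by omega))]
          rw [hl, show k - 1 = i from by omega]
        · omega
      · rw [if_neg (by omega : ¬ i < k), if_neg (by omega : ¬ i + 1 < k)]
        rw [hset _ (fun h1 => hdist (i+2) (k+1) (by omega) (by omega) (by omega))]
        have := inv.prv_chain (i+1) (by omega)
        rw [show i + 1 + 1 = i + 2 by omega] at this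
        exact this
  · have h0k : (0:Nat) < ps.length := by omega
    split
    · rename_i hrn
      rcases hrchar with ⟨h1, h2⟩ | ⟨h1, h2⟩
      · rw [h2, Int.toNat_natCast]
        rw [pv_set_getD_ne _ _ _ _ _ ?hne]
        · exact inv.prv_head
        case hne =>
          have : ps.getD 0 0 < ps.getD (k+1) 0 := inv.ps_sorted 0 (k+1) (by omega) (by omega)
          rw [inv.ps_head] at this
          omega
      · rw [h2] at hrn; omega
    · exact inv.prv_head
  · apply pvInsertKey_pairwise
    have := inv.q_sorted
    rw [hq, List.pairwise_cons] at this
    exact this.2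
  · intro q hq'
    by_cases hql : q = leftN
    · subst hql
      rw [pv_set_getD_self _ _ _ _ (by rw [inv.text_len]; omega)]
      exact pvInsertKey_mem.2 (Or.inl rfl)
    · rw [pv_set_getD_ne _ _ _ _ _ (fun h => hql h.symm)]
      have hkmem := inv.q_mem q (hmem' q hq')
      rw [hq, List.mem_cons] at hkmem
      rcases hkmem with hk1' | hk2'
      · exfalso
        have h2 := congrArg Prod.snd hk1'
        simp only at h2
        have hqpj : q = ps.getD j 0 := by exact_mod_cast h2
        rw [hpjk] at hqpj
        split at hqpj
        · exact hql hqpj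
        · rw [hqpj] at hq'; exact hrnot hq'
      · exact pvInsertKey_mem.2 (Or.inr hk2')
  · intro e he
    rcases pvInsertKey_mem.1 he with rfl | he'
    · simp only
      omega
    · exact inv.q_pos e (by rw [hq]; exact List.mem_cons_of_mem _ he')

-- the merged abstract list is A's rebuilt list
theorem pv_map_step (ps : List Nat) (text : List String) (k : Nat) (hk1 : 1 ≤ k)
    (hk : k < ps.length)
    (hsorted : ∀ i j, i < j → j < ps.length → ps.getD i 0 < ps.getD j 0)
    (leftN : Nat) (hl : leftN = ps.getD (k-1) 0) (merged : String)
    (hbl : leftN < text.length) :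
    (ps.eraseIdx k).map (fun q => (text.set leftN merged).getD q "")
      = (ps.map (fun q => text.getD q "")).take (k-1)
        ++ merged :: (ps.map (fun q => text.getD q "")).drop (k+1) := by
  have hmono : ∀ i j, ∀ (hij : i < j) (hj : j < ps.length), ps[i]'(Nat.lt_trans hij hj) < ps[j] := by
    intro i j hij hj
    have := hsorted i j hij hj
    rwa [List.getD_eq_getElem _ _ (Nat.lt_trans hij hj), List.getD_eq_getElem _ _ hj] at this
  have hlK : leftN = ps[k-1]'(by omega) := by
    rw [hl, List.getD_eq_getElem _ _ (by omega)]
  have hel : (ps.eraseIdx k).length = ps.length - 1 := by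
    rw [List.length_eraseIdx, if_pos hk]
  have hne_left : ∀ i, ∀ (hi : i < ps.length), i ≠ k - 1 → leftN ≠ ps[i] := by
    intro i hi hne
    rw [hlK]
    rcases Nat.lt_or_ge i (k-1) with hlt | hge
    · exact (Nat.ne_of_lt (hmono i (k-1) hlt (by omega))).symm
    · exact Nat.ne_of_lt (hmono (k-1) i (by omega) hi)
  apply List.ext_getElem
  · simp [hel]
    omega
  · intro i h1 h2
    have hi' : i < ps.length - 1 := by
      rw [List.length_map, hel] at h1
      exact h1
    rw [List.getElem_map]
    have hTlen : ((ps.map (fun q => text.getD q "")).take (k-1)).length = k - 1 := by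
      simp; omega
    rcases lt_trichotomy i (k-1) with hc | hc | hc
    · rw [List.getElem_append_left (by omega), List.getElem_take, List.getElem_map,
        List.getElem_eraseIdx_of_lt _ (by omega)]
      exact pv_set_getD_ne text leftN _ merged "" (hne_left i (by omega) (by omega))
    · rw [List.getElem_append_right (by omega)]
      have h0 : i - ((ps.map (fun q => text.getD q "")).take (k-1)).length = 0 := by omega
      simp only [h0]
      rw [List.getElem_cons_zero]
      rw [List.getElem_eraseIdx_of_lt _ (by omega)]
      subst hc
      rw [← hlK]
      exact pv_set_getD_self text leftN merged "" hbl
    · rw [List.getElem_append_right (by omega)]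
      have h3 : i - ((ps.map (fun q => text.getD q "")).take (k-1)).length = (i - k) + 1 := by omega
      simp only [h3]
      rw [List.getElem_cons_succ, List.getElem_drop, List.getElem_map]
      rw [List.getElem_eraseIdx_of_ge _ (by omega)]
      have h4 : k + 1 + (i - k) = i + 1 := by omega
      have hne : leftN ≠ ps[i+1]'(by omega) := hne_left (i+1) (by omega) (by omega)
      have h5 := pv_set_getD_ne text leftN (ps[i+1]'(by omega)) merged "" hne
      simp_rw [h4]
      exact h5

-- the final pointer walk reads off exactly the alive texts in order
theorem pv_traverse (n : Nat) (text : List String) (nxt : List Int) (hnl : nxt.length = n) :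
    ∀ ps : List Nat, ps ≠ [] →
      (∀ p ∈ ps, p < n) →
      (∀ i, i + 1 < ps.length → nxt.getD (ps.getD i 0) 0 = ((ps.getD (i+1) 0 : Nat) : Int)) →
      (∀ i j, i < j → j < ps.length → ps.getD i 0 < ps.getD j 0) →
      nxt.getD (ps.getD (ps.length - 1) 0) 0 = (n : Int) →
      pvTraverse (n : Int) text nxt ((ps.getD 0 0 : Nat) : Int) = ps.map (fun p => text.getD p "") := by
  intro ps
  induction ps with
  | nil => intro h; exact absurd rfl h
  | cons a tl ih =>
    intro _ hbound hchain hsorted hlast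
    have ha : a < n := hbound a (by simp)
    cases tl with
    | nil =>
      have hlast' : nxt.getD a 0 = (n : Int) := by simpa using hlast
      rw [pvTraverse]
      simp only [List.getD_cons_zero]
      rw [dif_pos (by exact_mod_cast ha : ((a:Nat):Int) < (n:Int))]
      have hj : PySem.List.pyGetD nxt ((a : Nat) : Int) (n : Int) = (n : Int) := by
        rw [PySem.List.pyGetD_natCast, List.getD_eq_getElem _ _ (show a < nxt.length by omega),
          ← List.getD_eq_getElem nxt 0 (show a < nxt.length by omega)]
        exact hlast'
      rw [hj, dif_pos (by exact_mod_cast ha), pvTraverse, dif_neg (lt_irrefl _)]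
      rw [PySem.List.pyGetD_natCast]
      simp
    | cons b tl' =>
      have hab : a < b := by
        have := hsorted 0 1 (by omega) (by simp)
        simpa using this
      have hb : b < n := hbound b (by simp)
      have hj : PySem.List.pyGetD nxt ((a : Nat) : Int) (n : Int) = ((b : Nat) : Int) := by
        rw [PySem.List.pyGetD_natCast, List.getD_eq_getElem _ _ (show a < nxt.length by omega),
          ← List.getD_eq_getElem nxt 0 (show a < nxt.length by omega)]
        have := hchain 0 (by simp)
        simpa using this
      rw [pvTraverse]
      simp only [List.getD_cons_zero]
      rw [dif_pos (by exact_mod_cast ha : ((a:Nat):Int) < (n:Int))]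
      rw [hj, dif_pos (by exact_mod_cast hab)]
      rw [PySem.List.pyGetD_natCast]
      have htl := ih (by simp) (fun p hp => hbound p (List.mem_cons_of_mem a hp))
        (fun i hi => by
          have := hchain (i+1) (by simpa using hi)
          simpa using this)
        (fun i j hij hjl => by
          have := hsorted (i+1) (j+1) (by omega) (by simpa using hjl)
          simpa using this)
        (by
          have := hlast
          simpa using this)
      simp only [List.getD_cons_zero] at htl
      rw [htl]
      rfl

-- B's loop, started in an invariant state, computes A's result on the abstract list
theorem pv_loop (n : Nat) : ∀ (m : Nat) (queue : List (Int × Int)) (text : List String)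
    (alive : List Bool) (nxt prv : List Int) (ps : List Nat),
    ps.length + queue.length ≤ m →
    PvInv n ps queue text alive nxt prv →
    pvTraverse (n : Int) (pvCapLoop (n : Int) queue text alive nxt prv (ps.length : Int)).1
        (pvCapLoop (n : Int) queue text alive nxt prv (ps.length : Int)).2 0
      = enforce_max_cap_py (ps.map (fun p => text.getD p "")) := by
  intro m
  induction m with
  | zero =>
    intro queue text alive nxt prv ps hm inv
    exfalso
    have := inv.ps_ne
    have hl0 : ps.length = 0 := by omega
    exact this (List.length_eq_zero_iff.1 hl0)
  | succ m ih =>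
    intro queue text alive nxt prv ps hm inv
    by_cases hbig : 20 < ps.length
    · -- the loop body runs
      have hcount : (20 : Int) < (ps.length : Int) := by exact_mod_cast hbig
      -- the queue cannot be empty: the head position 0 is alive and has an entry
      have hps0 : (0 : Nat) ∈ ps := by
        refine (pv_mem_getD ps 0).2 ⟨0, by omega, inv.ps_head⟩
      cases hqe : queue with
      | nil =>
        exfalso
        have := inv.q_mem 0 hps0
        rw [hqe] at this
        exact List.not_mem_nil this
      | cons e rest =>
      obtain ⟨l, p⟩ := e
      subst hqe
      have hppos : 0 ≤ p ∧ p < (n : Int) := inv.q_pos (l, p) (List.mem_cons_self)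
      set pN := p.toNat with hpN
      have hpcast : p = ((pN : Nat) : Int) := by omega
      have hpn : pN < n := by omega
      rw [pvCapLoop, if_pos hcount]
      by_cases hv : (PySem.List.pyGetD alive p false) = false
        ∨ PySem.Str.len (PySem.List.pyGetD text p "") ≠ l
      · -- stale entry: drop it and continue
        rw [if_pos hv]
        apply ih rest text alive nxt prv ps (by simp at hm ⊢; omega)
        refine ⟨inv.text_len, inv.alive_len, inv.nxt_len, inv.prv_len, inv.ps_ne, inv.ps_head,
          inv.ps_bound, inv.ps_sorted, inv.alive_iff, inv.nxt_chain, inv.nxt_last,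
          inv.prv_chain, inv.prv_head, ?_, ?_, ?_⟩
        · have := inv.q_sorted
          rw [List.pairwise_cons] at this
          exact this.2
        · intro q hq'
          have hmemq := inv.q_mem q hq'
          rw [List.mem_cons] at hmemq
          rcases hmemq with heq | hin
          · exfalso
            have h2 := congrArg Prod.snd heq
            simp only at h2
            have hqp : q = pN := by omega
            apply hv.elim
            · intro hfalse
              rw [hpcast, PySem.List.pyGetD_natCast, ← hqp] at hfalse
              rw [(inv.alive_iff q (inv.ps_bound q hq')).2 hq'] at hfalse
              cases hfalse
            · intro hne
              apply hne
              have h1 := congrArg Prod.fst heq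
              simp only at h1
              rw [hpcast, PySem.List.pyGetD_natCast, ← hqp]
              exact h1
          · exact hin
        · intro e he
          exact inv.q_pos e (List.mem_cons_of_mem _ he)
      · -- valid entry: perform the merge
        rw [if_neg hv]
        rw [not_or, not_not] at hv
        obtain ⟨halive, hlen⟩ := hv
        have halive' : alive.getD pN false = true := by
          rw [hpcast, PySem.List.pyGetD_natCast] at halive
          rcases hb : alive.getD pN false with _ | _
          · exact absurd hb halive
          · rfl
        have hmemp : pN ∈ ps := (inv.alive_iff pN hpn).1 halive'
        have hlen' : PySem.Str.len (text.getD pN "") = l := by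
          rw [hpcast, PySem.List.pyGetD_natCast] at hlen
          exact hlen
        obtain ⟨j, hj, hpsj, hfa⟩ := pv_argminB n ps ((l, p) :: rest) text alive nxt prv inv
          l pN rest (by rw [hpcast]) hmemp hlen'
        have hk1 : 1 ≤ max j 1 := by omega
        have hkl : max j 1 < ps.length := by
          rcases Nat.eq_zero_or_pos j with h0 | h1
          · rw [h0]; omega
          · rw [Nat.max_eq_left h1]; omega
        set k := max j 1 with hk
        set leftN := ps.getD (k-1) 0 with hleft
        set rightN := ps.getD k 0 with hright
        have hbndl : leftN < n := inv.ps_bound _ ((pv_mem_getD ps _).2 ⟨k-1, by omega, rfl⟩)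
        have hbndr : rightN < n := inv.ps_bound _ ((pv_mem_getD ps _).2 ⟨k, by omega, rfl⟩)
        -- evaluate the branch selecting (left, right)
        have hlr : (if 0 ≤ PySem.List.pyGetD prv p (-1)
            then (PySem.List.pyGetD prv p (-1), p)
            else (p, PySem.List.pyGetD nxt p (n : Int)))
            = (((leftN : Nat) : Int), ((rightN : Nat) : Int)) := by
          have hprv : PySem.List.pyGetD prv p (-1) = prv.getD pN 0 := by
            rw [hpcast, PySem.List.pyGetD_natCast,
              List.getD_eq_getElem _ _ (show pN < prv.length by rw [inv.prv_len]; omega),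
              List.getD_eq_getElem _ _ (show pN < prv.length by rw [inv.prv_len]; omega)]
          rcases Nat.eq_zero_or_pos j with h0 | h1
          · have hp0 : pN = 0 := by rw [← hpsj, h0, inv.ps_head]
            have hprv0 : prv.getD pN 0 = -1 := by rw [hp0]; exact inv.prv_head
            rw [if_neg (by rw [hprv, hprv0]; omega)]
            have hnxt : PySem.List.pyGetD nxt p (n : Int) = ((ps.getD 1 0 : Nat) : Int) := by
              have h01 := inv.nxt_chain 0 (by omega)
              rw [inv.ps_head] at h01
              rw [hpcast, PySem.List.pyGetD_natCast, hp0,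
                List.getD_eq_getElem _ _ (show 0 < nxt.length by rw [inv.nxt_len]; omega),
                ← List.getD_eq_getElem nxt 0 (show 0 < nxt.length by rw [inv.nxt_len]; omega)]
              exact h01
            rw [hnxt, hpcast]
            have : k = 1 := by omega
            rw [show leftN = pN by rw [hleft, this, ← hpsj, h0]]
            rw [show rightN = ps.getD 1 0 by rw [hright, this]]
          · have hkj : k = j := by rw [hk, Nat.max_eq_left h1]
            have hprvj : prv.getD pN 0 = ((ps.getD (j-1) 0 : Nat) : Int) := by
              rw [← hpsj, show j = j - 1 + 1 by omega]
              exact inv.prv_chain (j-1) (by omega)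
            rw [if_pos (by rw [hprv, hprvj]; omega)]
            rw [hprv, hprvj, hpcast]
            rw [show leftN = ps.getD (j-1) 0 by rw [hleft, hkj]]
            rw [show rightN = pN by rw [hright, hkj, hpsj]]
        rw [hlr]
        simp only
        -- the merged text and pointer reads, in getD form
        have hgl : PySem.List.pyGetD text ((leftN : Nat) : Int) "" = text.getD leftN "" :=
          PySem.List.pyGetD_natCast _ _ _
        have hgr : PySem.List.pyGetD text ((rightN : Nat) : Int) "" = text.getD rightN "" :=
          PySem.List.pyGetD_natCast _ _ _
        set merged := PySem.Str.rstrip (text.getD leftN "") ++ "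

" ++ text.getD rightN ""
          with hmerged
        have hrrval : PySem.List.pyGetD nxt ((rightN : Nat) : Int) (n : Int) = nxt.getD rightN 0 := by
          rw [PySem.List.pyGetD_natCast,
            List.getD_eq_getElem _ _ (show rightN < nxt.length by rw [inv.nxt_len]; omega),
            List.getD_eq_getElem _ _ (show rightN < nxt.length by rw [inv.nxt_len]; omega)]
        set rr := nxt.getD rightN 0 with hrr
        have hrrpos : 0 ≤ rr := by
          rcases Nat.lt_or_ge (k+1) ps.length with hlt | hge
          · rw [hrr, hright, inv.nxt_chain k hlt]; omega
          · have : k = ps.length - 1 := by omega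
            rw [hrr, hright, this, inv.nxt_last]; omega
        -- the updated state, in set form
        have e1 : PySem.List.pySetD text ((leftN : Nat) : Int) merged = text.set leftN merged :=
          PySem.List.pySetD_natCast _ _ _
        have e2 : PySem.List.pySetD alive ((rightN : Nat) : Int) false = alive.set rightN false :=
          PySem.List.pySetD_natCast _ _ _
        have e3 : PySem.List.pySetD nxt ((leftN : Nat) : Int) rr = nxt.set leftN rr :=
          PySem.List.pySetD_natCast _ _ _
        have e4 : (if rr < (n : Int) then PySem.List.pySetD prv rr ((leftN : Nat) : Int) else prv)
            = (if rr < (n : Int) then prv.set rr.toNat ((leftN : Nat) : Int) else prv) := by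
          split
          · exact PySem.List.pySetD_of_nonneg _ _ hrrpos
          · rfl
        rw [hgl, hgr, hrrval, e1, e2, e3, e4]
        have hqeq : ((l, p) :: rest : List (Int × Int))
            = (PySem.Str.len (text.getD (ps.getD j 0) ""), ((ps.getD j 0 : Nat) : Int)) :: rest := by
          rw [hpsj, hlen', hpcast]
        have inv2 := pv_inv_step n ps ((l, p) :: rest) text alive nxt prv inv hbig j hj rest
          hqeq k hk leftN rightN hleft hright merged hmerged rr hrr
        have hcount' : ((ps.length : Int) - 1) = (((ps.eraseIdx k).length : Nat) : Int) := by
          rw [List.length_eraseIdx, if_pos hkl]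
          omega
        rw [hcount']
        have hlenins : (pvInsertKey (PySem.Str.len merged, ((leftN : Nat) : Int)) rest).length
            = rest.length + 1 := (pvInsertKey_perm _ _).length_eq
        rw [ih _ _ _ _ _ _ (by
          rw [hlenins, List.length_eraseIdx, if_pos hkl]
          simp at hm
          omega) inv2]
        -- now rewrite A's side: one step of A's while-loop at the argmin j
        rw [pv_map_step ps text k hk1 hkl inv.ps_sorted leftN hleft merged
          (by rw [inv.text_len]; omega)]
        have hxl : (ps.map (fun q => text.getD q "")).getD (k-1) ""
            = text.getD leftN "" := by
          rw [pv_map_getD ps _ (k-1) 0 "" (by omega), hleft]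
        have hxr : (ps.map (fun q => text.getD q "")).getD k ""
            = text.getD rightN "" := by
          rw [pv_map_getD ps _ k 0 "" (by omega), hright]
        have := pv_stepA (ps.map (fun q => text.getD q "")) (by simpa using hbig) j
          (by simpa using hfa)
        rw [hxl, hxr] at this
        rw [← hk] at this
        rw [hmerged]
        exact this.symm
    · -- the loop exits at once and the pointer walk reads off the list
      rw [pvCapLoop.eq_def, if_neg (by exact_mod_cast hbig : ¬ (20:Int) < (ps.length : Int))]
      have htr := pv_traverse n text nxt inv.nxt_len ps inv.ps_ne inv.ps_bound
        inv.nxt_chain inv.ps_sorted inv.nxt_last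
      rw [inv.ps_head] at htr
      rw [enforce_max_cap_py, if_neg (by simpa using hbig)]
      simpa using htr

-- the initial state satisfies the invariant
theorem pv_init (segments : List String) (h : 20 < segments.length) :
    PvInv segments.length (List.range segments.length)
      ((PySem.List.enumerate segments).foldl (fun q e => pvInsertKey (PySem.Str.len e.2, e.1) q) [])
      segments (List.replicate segments.length true)
      (PySem.List.pyRange 1 ((segments.length : Int) + 1) 1)
      (PySem.List.pyRange (-1) ((segments.length : Int) - 1) 1) := by
  set n := segments.length with hn
  have hNlen : (PySem.List.pyRange 1 ((n : Int) + 1) 1).length = n := by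
    rw [PySem.List.length_pyRange_one]; omega
  have hPlen : (PySem.List.pyRange (-1) ((n : Int) - 1) 1).length = n := by
    rw [PySem.List.length_pyRange_one]; omega
  have hr1 : ∀ i, i < n → (List.range n).getD i 0 = i := by
    intro i hi
    rw [List.getD_eq_getElem _ _ (by simpa using hi), List.getElem_range]
  have hN : ∀ i, i < n → (PySem.List.pyRange 1 ((n : Int) + 1) 1).getD i 0 = 1 + (i : Int) := by
    intro i hi
    rw [List.getD_eq_getElem _ _ (by omega), PySem.List.getElem_pyRange_one]
  have hP : ∀ i, i < n → (PySem.List.pyRange (-1) ((n : Int) - 1) 1).getD i 0 = -1 + (i : Int) := by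
    intro i hi
    rw [List.getD_eq_getElem _ _ (by omega), PySem.List.getElem_pyRange_one]
  have hkeys : ((PySem.List.enumerate segments).foldl
      (fun q e => pvInsertKey (PySem.Str.len e.2, e.1) q) [])
      = ((PySem.List.enumerate segments).map (fun e => (PySem.Str.len e.2, e.1))).foldl
        (fun q k => pvInsertKey k q) [] := by
    rw [List.foldl_map]
  have hperm := pv_foldl_insert_perm
    ((PySem.List.enumerate segments).map (fun e => (PySem.Str.len e.2, e.1))) []
  refine ⟨rfl, List.length_replicate, hNlen, hPlen, ?_, hr1 0 (by omega), ?_, ?_, ?_, ?_, ?_, ?_, ?_, ?_, ?_, ?_⟩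
  · intro hc
    have := congrArg List.length hc
    simp at this
    omega
  · intro p hp
    exact List.mem_range.1 hp
  · intro i j hij hjl
    rw [hr1 i (by simp at hjl; omega), hr1 j (by simpa using hjl)]
    exact hij
  · intro q hq
    constructor
    · intro _; exact List.mem_range.2 hq
    · intro _
      rw [List.getD_eq_getElem _ _ (by simpa using hq), List.getElem_replicate]
  · intro i hi
    simp only [List.length_range] at hi
    rw [hr1 i (by omega), hr1 (i+1) (by omega), hN i (by omega)]
    push_cast
    ring
  · simp only [List.length_range]
    rw [hr1 (n-1) (by omega), hN (n-1) (by omega)]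
    omega
  · intro i hi
    simp only [List.length_range] at hi
    rw [hr1 i (by omega), hr1 (i+1) (by omega), hP (i+1) (by omega)]
    push_cast
    ring
  · rw [hP 0 (by omega)]
    simp
  · rw [hkeys]
    exact pv_foldl_insert_pairwise _ [] (by simp)
  · intro p hp
    have hpn : p < n := List.mem_range.1 hp
    rw [hkeys, hperm.mem_iff]
    simp only [List.nil_append]
    rw [List.mem_map]
    refine ⟨((p : Int), segments[p]'(by omega)), ?_, ?_⟩
    · rw [PySem.List.mem_enumerate_iff]
      exact ⟨p, by omega, by simp⟩
    · rw [List.getD_eq_getElem _ _ (by omega)]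
  · intro e he
    rw [hkeys, hperm.mem_iff] at he
    simp only [List.nil_append, List.mem_map] at he
    obtain ⟨x, hx, rfl⟩ := he
    rw [PySem.List.mem_enumerate_iff] at hx
    obtain ⟨k, hk, rfl⟩ := hx
    simp
    omega

theorem pv_range_map_getD (l : List String) :
    (List.range l.length).map (fun p => l.getD p "") = l := by
  apply List.ext_getElem
  · simp
  · intro i h1 h2
    simp [List.getElem?_eq_getElem h2]

-- ===== VERDICT (by name: the statement is the Claim_ definition above) =====
theorem enforce_max_cap_py_spec : Claim_equal_enforce_max_cap_py := by
  intro segments _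
  unfold Spec_enforce_max_cap_py enforce_max_cap_py_alt
  by_cases h : (segments.length : Int) ≤ 20
  · simp only [if_pos h]
    rw [enforce_max_cap_py, if_neg (by omega)]
  · simp only [if_neg h]
    have h20 : 20 < segments.length := by omega
    have hmain := pv_loop segments.length
      ((List.range segments.length).length
        + ((PySem.List.enumerate segments).foldl
            (fun q e => pvInsertKey (PySem.Str.len e.2, e.1) q) []).length)
      ((PySem.List.enumerate segments).foldl
        (fun q e => pvInsertKey (PySem.Str.len e.2, e.1) q) [])
      segments (List.replicate segments.length true)
      (PySem.List.pyRange 1 ((segments.length : Int) + 1) 1)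
      (PySem.List.pyRange (-1) ((segments.length : Int) - 1) 1)
      (List.range segments.length) (le_refl _) (pv_init segments h20)
    rw [pv_range_map_getD] at hmain
    simp only [List.length_range] at hmain
    exact hmain.symm
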